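-- pv_equiv track=rewrite | github.com/KangchengHou/admix-kit | admix/io/_lanc.py | _subset_lanc
-- ===== SOURCE A (Python) =====
-- from bisect import bisect_left
--
-- def _subset_lanc(start: int, stop: int, break_list, value_list):
--     """
--     Subset the .lanc file
--
--     Parameters
--     ----------
--     start : int
--         start of SNP
--     stop : int
--         stop of SNP
--     break_list: List[List[int]]
--         list of break points
--     value_list: List[List[str]]
--
--     """
--     # For each individual, find index of break points that's within [start, stop]
--     start_idx = [bisect_left(indiv_break, start) for indiv_break in break_list]
--     stop_idx = [bisect_left(indiv_break, stop) for indiv_break in break_list]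
--     new_break_list = [
--         br[s:e] + [stop] for s, e, br in zip(start_idx, stop_idx, break_list)
--     ]
--     # offset with start
--     new_break_list = [[b - start for b in br] for br in new_break_list]
--     # find corresponding value
--     new_value_list = [
--         val[s:e] + [val[e]] for s, e, val in zip(start_idx, stop_idx, value_list)
--     ]
--
--     return new_break_list, new_value_list
-- ===== SOURCE B (Python) =====
-- def _window(br, start, stop):
--     # linear scans: index of the first breakpoint not below start, resp. not below stop
--     i = 0
--     while i < len(br) and br[i] < start:
--         i += 1
--     j = 0
--     while j < len(br) and br[j] < stop:
--         j += 1
--     return i, j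
--
--
-- def _subset_lanc(start: int, stop: int, break_list, value_list):
--     new_break_list = []
--     for br in break_list:
--         i, j = _window(br, start, stop)
--         new_break_list.append([br[k] - start for k in range(i, j)] + [stop - start])
--     new_value_list = []
--     for br, val in zip(break_list, value_list):
--         i, j = _window(br, start, stop)
--         new_value_list.append([val[k] for k in range(i, j)] + [val[j]])
--     return new_break_list, new_value_list
-- ===== Notes on version B (the rewrite author's own statement) =====
-- stated objective: idiomatic
-- what changed: Replaces bisect_left plus slice plus a separate offsetting comprehension plus two zip3 comprehensions by a linear-scan _window helper that finds each row's two boundary indices with index-advancing while loops, and two plain loops that emit the shifted breakpoints and the matching values directly; Pre_ excludes the inputs where A raises IndexError and, as an accident of A's implementation, rows not partitioned around start or stop (every sorted .lanc row is partitioned), where bisect_left's answer is an artefact of its probe sequence.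
-- outside the precondition, e.g. on _subset_lanc(0, 1, [[1, 0]], []): A returns ([[1, 0, 1]], []), B returns ([[1]], [])
import Mathlib
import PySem

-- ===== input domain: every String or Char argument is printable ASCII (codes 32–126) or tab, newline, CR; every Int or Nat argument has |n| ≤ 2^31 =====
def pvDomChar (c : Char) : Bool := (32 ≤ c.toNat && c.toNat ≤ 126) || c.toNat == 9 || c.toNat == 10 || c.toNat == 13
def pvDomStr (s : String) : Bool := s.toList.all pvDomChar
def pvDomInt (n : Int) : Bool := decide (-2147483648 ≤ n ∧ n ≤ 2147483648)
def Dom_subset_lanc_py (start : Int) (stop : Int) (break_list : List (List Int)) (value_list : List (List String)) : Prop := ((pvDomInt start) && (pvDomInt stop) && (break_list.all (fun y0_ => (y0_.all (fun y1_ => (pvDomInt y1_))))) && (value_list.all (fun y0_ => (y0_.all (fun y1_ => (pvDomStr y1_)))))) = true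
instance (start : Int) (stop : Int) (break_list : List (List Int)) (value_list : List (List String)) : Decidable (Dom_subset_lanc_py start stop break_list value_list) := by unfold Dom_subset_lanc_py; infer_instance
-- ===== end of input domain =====

-- B replaces A's bisect + slice + separate offsetting comprehension passes by a linear-scan
-- window helper and two plain emission loops (objective: idiomatic; same practical cost).

-- ===== PORT A =====
-- A: start_idx/stop_idx by bisect_left, then slice + append + offset comprehensions.
-- val[e] is ported as pyGetD (exact while e < len(val); Python raises IndexError there,
-- which Pre_ excludes).
def subset_lanc_py (start : Int) (stop : Int) (break_list : List (List Int)) (value_list : List (List String)) : List (List Int) × List (List String) :=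
  let start_idx : List Nat := break_list.map (fun indiv_break => PySem.List.bisectLeft indiv_break start)
  let stop_idx : List Nat := break_list.map (fun indiv_break => PySem.List.bisectLeft indiv_break stop)
  let new_break_list : List (List Int) :=
    ((start_idx.zip stop_idx).zip break_list).map
      (fun p => PySem.List.slice p.2 (some (p.1.1 : Int)) (some (p.1.2 : Int)) ++ [stop])
  let new_break_list2 : List (List Int) := new_break_list.map (fun br => br.map (fun b => b - start))
  let new_value_list : List (List String) :=
    ((start_idx.zip stop_idx).zip value_list).map
      (fun p => PySem.List.slice p.2 (some (p.1.1 : Int)) (some (p.1.2 : Int)) ++ [PySem.List.pyGetD p.2 (p.1.2 : Int) ""])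
  (new_break_list2, new_value_list)

-- ===== PORT B =====
-- _window's two while loops share one shape (advance while br[i] < threshold): bWhileLt
def bWhileLt (br : List Int) (x : Int) (i : Nat) : Nat :=
  if h : i < br.length then
    if br[i] < x then bWhileLt br x (i + 1) else i
  else i
termination_by br.length - i

-- B's _window: linear scans for the first breakpoint not below start, resp. not below stop
def bWindow (br : List Int) (start : Int) (stop : Int) : Nat × Nat :=
  (bWhileLt br start 0, bWhileLt br stop 0)

-- one row of B's first loop: [br[k] - start for k in range(i, j)] + [stop - start]
-- (br[k]/val[k] are ported as pyGetD; exact while in range — Python raises IndexError out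
-- of range, which Pre_ excludes)
def bBreakRow (start : Int) (stop : Int) (br : List Int) : List Int :=
  let w := bWindow br start stop
  (PySem.List.pyRange (w.1 : Int) (w.2 : Int)).map (fun k => PySem.List.pyGetD br k 0 - start)
    ++ [stop - start]

-- one row of B's second loop: [val[k] for k in range(i, j)] + [val[j]]
def bValueRow (start : Int) (stop : Int) (br : List Int) (val : List String) : List String :=
  let w := bWindow br start stop
  (PySem.List.pyRange (w.1 : Int) (w.2 : Int)).map (fun k => PySem.List.pyGetD val k "")
    ++ [PySem.List.pyGetD val (w.2 : Int) ""]

def subset_lanc_py_alt (start : Int) (stop : Int) (break_list : List (List Int)) (value_list : List (List String)) : List (List Int) × List (List String) :=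
  (break_list.map (bBreakRow start stop),
   (break_list.zip value_list).map (fun p => bValueRow start stop p.1 p.2))

-- ===== PRECONDITION & SPEC =====
-- Pre_ excludes (i) the inputs on which A raises IndexError (some paired row has fewer
-- values than breakpoints below stop), and (ii) as an accident of A's implementation,
-- rows not partitioned around start or stop (everything below the bound before everything
-- not below it — true of every sorted .lanc row): bisect_left's answer on such rows is an
-- artefact of its probe sequence.
def Pre_subset_lanc_py (start : Int) (stop : Int) (break_list : List (List Int)) (value_list : List (List String)) : Prop :=
  (∀ br ∈ break_list,
      br.Pairwise (fun a b => b < start → a < start) ∧ br.Pairwise (fun a b => b < stop → a < stop)) ∧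
    ∀ p ∈ break_list.zip value_list, p.1.countP (fun b => decide (b < stop)) < p.2.length
instance (start : Int) (stop : Int) (break_list : List (List Int)) (value_list : List (List String)) : Decidable (Pre_subset_lanc_py start stop break_list value_list) := by unfold Pre_subset_lanc_py; infer_instance

def pvWitness_subset_lanc_py : Int × Int × List (List Int) × List (List String) :=
  (0, 10, [[3, 10]], [["a", "b"]])

def Spec_subset_lanc_py (start : Int) (stop : Int) (break_list : List (List Int)) (value_list : List (List String)) (out : List (List Int) × List (List String)) : Prop := out = subset_lanc_py_alt start stop break_list value_list
instance (start : Int) (stop : Int) (break_list : List (List Int)) (value_list : List (List String)) (out : List (List Int) × List (List String)) : Decidable (Spec_subset_lanc_py start stop break_list value_list out) := by unfold Spec_subset_lanc_py; infer_instance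

-- ===== CLAIM (what is proved, stated in full; the proofs are below) =====
def Claim_equal_subset_lanc_py : Prop := ∀ (start : Int) (stop : Int) (break_list : List (List Int)) (value_list : List (List String)), Dom_subset_lanc_py start stop break_list value_list → Pre_subset_lanc_py start stop break_list value_list → Spec_subset_lanc_py start stop break_list value_list (subset_lanc_py start stop break_list value_list)

-- ===== LEMMAS AND PROOFS =====

-- "n is where the first scan past elements < x stops": n ≤ len, everything before n is
-- < x, and the entry at n (if any) is not. Such an n is unique.
def FirstIdx (x : Int) (br : List Int) (n : Nat) : Prop :=
  n ≤ br.length ∧ (∀ j (_ : j < br.length), j < n → br[j] < x) ∧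
    (∀ (_ : n < br.length), ¬ br[n]'(by omega) < x)

theorem firstIdx_unique {x : Int} {br : List Int} {m n : Nat}
    (hm : FirstIdx x br m) (hn : FirstIdx x br n) : m = n := by
  obtain ⟨hm1, hm2, hm3⟩ := hm
  obtain ⟨hn1, hn2, hn3⟩ := hn
  by_contra hne
  rcases Nat.lt_or_ge m n with h | h
  · exact hm3 (by omega) (hn2 m (by omega) h)
  · have h' : n < m := by omega
    exact hn3 (by omega) (hm2 n (by omega) h')

-- the binary-search loop lands on the partition point of a row partitioned around x:
-- it only ever asks 'br[mid] < x', and on a partitioned row that answer is monotone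
theorem bisectLoop_firstIdx (x : Int) (br : List Int)
    (hp : br.Pairwise (fun a b => b < x → a < x)) :
    ∀ (fuel lo hi : Nat), hi ≤ br.length → lo ≤ hi → hi - lo ≤ fuel →
    (∀ j (_ : j < br.length), j < lo → br[j] < x) →
    (∀ j (_ : j < br.length), hi ≤ j → ¬ br[j] < x) →
    FirstIdx x br (PySem.List.bisectLeftLoop br x fuel lo hi) := by
  have hidx : ∀ j k (hj : j < br.length) (hk : k < br.length), j < k → br[k] < x → br[j] < x :=
    fun j k hj hk hjk => (List.pairwise_iff_getElem.mp hp) j k hj hk hjk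
  intro fuel
  induction fuel with
  | zero =>
    intro lo hi hhi hlohi hfuel hlo hhi'
    have : lo = hi := by omega
    subst this
    rw [PySem.List.bisectLeftLoop]
    exact ⟨by omega, fun j hj hjlo => hlo j hj hjlo, fun h => hhi' lo (by omega) le_rfl⟩
  | succ m ih =>
    intro lo hi hhi hlohi hfuel hlo hhi'
    rw [PySem.List.bisectLeftLoop]
    by_cases h : lo < hi
    · simp only [if_pos h]
      have hmid : (lo + hi) / 2 < br.length := by omega
      rw [List.getElem?_eq_getElem hmid]
      by_cases hy : br[(lo + hi) / 2] < x
      · simp only [hy, if_true]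
        refine ih ((lo + hi) / 2 + 1) hi hhi (by omega) (by omega) ?_ hhi'
        intro j hj hjlo
        rcases Nat.lt_or_ge j ((lo + hi) / 2) with hc | hc
        · exact hidx j _ hj hmid hc hy
        · have : j = (lo + hi) / 2 := by omega
          subst this; exact hy
      · simp only [hy, if_false]
        refine ih lo ((lo + hi) / 2) (by omega) (by omega) (by omega) hlo ?_
        intro j hj hjm
        rcases Nat.lt_or_ge ((lo + hi) / 2) j with hc | hc
        · exact fun hjx => hy (hidx _ j hmid hj hc hjx)
        · have : j = (lo + hi) / 2 := by omega
          subst this; exact hy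
    · simp only [if_neg h]
      have : lo = hi := by omega
      subst this
      exact ⟨by omega, fun j hj hjlo => hlo j hj hjlo, fun h' => hhi' lo (by omega) le_rfl⟩

-- bisect_left on a partitioned row is a FirstIdx
theorem bisect_firstIdx (x : Int) (br : List Int)
    (hp : br.Pairwise (fun a b => b < x → a < x)) :
    FirstIdx x br (PySem.List.bisectLeft br x) :=
  bisectLoop_firstIdx x br hp br.length 0 br.length le_rfl (by omega) (by omega)
    (by omega) (fun j hj hge => by omega)

-- countP (· < x) on a partitioned row is a FirstIdx (the form Pre_'s value bound states)
theorem countP_firstIdx (x : Int) (br : List Int)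
    (hp : br.Pairwise (fun a b => b < x → a < x)) :
    FirstIdx x br (br.countP (fun b => decide (b < x))) := by
  induction br with
  | nil => exact ⟨by simp, by simp, by simp⟩
  | cons a tl ih =>
    obtain ⟨ha, htl⟩ := List.pairwise_cons.mp hp
    obtain ⟨ih1, ih2, ih3⟩ := ih htl
    by_cases hax : a < x
    · refine ⟨?_, ?_, ?_⟩
      · simp [hax]; omega
      · intro j hj hlt
        cases j with
        | zero => simpa using hax
        | succ k =>
          have : k < tl.countP (fun b => decide (b < x)) := by
            simp [hax] at hlt; omega
          simpa using ih2 k (by simpa using hj) this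
      · intro hlt
        have hc : (a :: tl).countP (fun b => decide (b < x)) =
            tl.countP (fun b => decide (b < x)) + 1 := by simp [hax]
        have hlt' : tl.countP (fun b => decide (b < x)) < tl.length := by
          have := hlt; rw [hc] at this; simpa using this
        simp only [hc, List.getElem_cons_succ]
        exact ih3 hlt'
    · have hz : tl.countP (fun b => decide (b < x)) = 0 := by
        rw [List.countP_eq_zero]
        intro b hb
        simp only [decide_eq_true_eq]
        exact fun hbx => hax (ha b hb hbx)
      have hc : (a :: tl).countP (fun b => decide (b < x)) = 0 := by
        simp [hax, hz]
      refine ⟨by omega, by omega, ?_⟩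
      intro hlt
      simp only [hc, List.getElem_cons_zero]
      exact hax

theorem bisect_eq_countP (x : Int) (br : List Int)
    (hp : br.Pairwise (fun a b => b < x → a < x)) :
    PySem.List.bisectLeft br x = br.countP (fun b => decide (b < x)) :=
  firstIdx_unique (bisect_firstIdx x br hp) (countP_firstIdx x br hp)

-- B's while-loop stops at a FirstIdx of its threshold, provided everything before the
-- entry index already passed (no sortedness needed: it is literally the first failing index)
theorem bWhileLt_firstIdx (x : Int) (br : List Int) : ∀ (n i : Nat),
    br.length - i = n → i ≤ br.length → (∀ j (_ : j < br.length), j < i → br[j] < x) →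
    FirstIdx x br (bWhileLt br x i) := by
  intro n
  induction n with
  | zero =>
    intro i hfuel hle hpre
    have hi : i = br.length := by omega
    rw [bWhileLt]
    simp only [hi, lt_irrefl]
    exact ⟨le_rfl, fun j hj _ => hpre j hj (by omega), fun h => absurd h (lt_irrefl _)⟩
  | succ m ih =>
    intro i hfuel hle hpre
    rw [bWhileLt]
    by_cases h : i < br.length
    · simp only [dif_pos h]
      by_cases hb : br[i] < x
      · simp only [if_pos hb]
        refine ih (i + 1) (by omega) (by omega) ?_
        intro j hj hj'
        rcases Nat.lt_or_ge j i with hc | hc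
        · exact hpre j hj hc
        · have : j = i := by omega
          subst this; exact hb
      · simp only [if_neg hb]
        exact ⟨by omega, fun j hj hj' => hpre j hj hj', fun _ => hb⟩
    · simp only [dif_neg h]
      have hi : i = br.length := by omega
      subst hi
      exact ⟨le_rfl, fun j hj hj' => hpre j hj hj', fun h' => absurd h' (lt_irrefl _)⟩

-- B's window is exactly A's pair of bisections (rows partitioned around start and stop)
theorem bWindow_eq (start stop : Int) (br : List Int)
    (hps : br.Pairwise (fun a b => b < start → a < start))
    (hpe : br.Pairwise (fun a b => b < stop → a < stop)) :
    bWindow br start stop = (PySem.List.bisectLeft br start, PySem.List.bisectLeft br stop) := by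
  have hi : bWhileLt br start 0 = PySem.List.bisectLeft br start :=
    firstIdx_unique (bWhileLt_firstIdx start br br.length 0 (by omega) (by omega) (by omega))
      (bisect_firstIdx start br hps)
  have hj : bWhileLt br stop 0 = PySem.List.bisectLeft br stop :=
    firstIdx_unique (bWhileLt_firstIdx stop br br.length 0 (by omega) (by omega) (by omega))
      (bisect_firstIdx stop br hpe)
  show (bWhileLt br start 0, bWhileLt br stop 0) =
    (PySem.List.bisectLeft br start, PySem.List.bisectLeft br stop)
  rw [hi, hj]

-- reading indices s..e-1 of xs is take/drop of xs (the form A's slice reduces to)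
theorem map_pyGetD_range {α : Type} (d : α) (xs : List α) (e : Nat) (he : e ≤ xs.length) :
    ∀ (n s : Nat), e - s = n →
    (PySem.List.pyRange (s : Int) (e : Int)).map (fun j => PySem.List.pyGetD xs j d)
      = List.take (e - s) (List.drop s xs) := by
  intro n
  induction n with
  | zero =>
    intro s h
    rw [PySem.List.pyRange_one_eq_nil (by exact_mod_cast Nat.le_of_sub_eq_zero h)]
    simp [h]
  | succ n ih =>
    intro s h
    have hse : s < e := by omega
    have hsl : s < xs.length := lt_of_lt_of_le hse he
    rw [PySem.List.pyRange_one_cons (by exact_mod_cast hse), List.map_cons]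
    have hcast : ((s : Int) + 1) = (((s + 1 : Nat) : Int)) := by push_cast; ring
    rw [hcast, ih (s + 1) (by omega), List.drop_eq_getElem_cons hsl]
    have hes : e - s = (e - (s + 1)) + 1 := by omega
    rw [hes, List.take_succ_cons]
    congr 1
    rw [PySem.List.pyGetD_natCast]
    exact List.getD_eq_getElem xs d hsl

-- one row of B's first loop equals one row of A's break output
theorem breakRow_eq (start stop : Int) (br : List Int)
    (hps : br.Pairwise (fun a b => b < start → a < start))
    (hpe : br.Pairwise (fun a b => b < stop → a < stop)) :
    bBreakRow start stop br =
      (PySem.List.slice br (some ((PySem.List.bisectLeft br start : Nat) : Int))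
          (some ((PySem.List.bisectLeft br stop : Nat) : Int)) ++ [stop]).map (fun b => b - start) := by
  have hel : PySem.List.bisectLeft br stop ≤ br.length := (bisect_firstIdx stop br hpe).1
  show (PySem.List.pyRange (((bWindow br start stop).1 : Nat) : Int) (((bWindow br start stop).2 : Nat) : Int)).map
      (fun k => PySem.List.pyGetD br k 0 - start) ++ [stop - start] = _
  rw [bWindow_eq start stop br hps hpe]
  rw [PySem.List.slice_natCast, List.map_append,
    ← map_pyGetD_range (0 : Int) br _ hel _ _ rfl, List.map_map]
  rfl

-- one row of B's second loop equals one row of A's value output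
theorem valueRow_eq (start stop : Int) (br : List Int) (val : List String)
    (hps : br.Pairwise (fun a b => b < start → a < start))
    (hpe : br.Pairwise (fun a b => b < stop → a < stop))
    (hv : br.countP (fun b => decide (b < stop)) < val.length) :
    bValueRow start stop br val =
      PySem.List.slice val (some ((PySem.List.bisectLeft br start : Nat) : Int))
          (some ((PySem.List.bisectLeft br stop : Nat) : Int)) ++
        [PySem.List.pyGetD val ((PySem.List.bisectLeft br stop : Nat) : Int) ""] := by
  have hvl : PySem.List.bisectLeft br stop < val.length := by
    rw [bisect_eq_countP stop br hpe]; exact hv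
  show (PySem.List.pyRange (((bWindow br start stop).1 : Nat) : Int) (((bWindow br start stop).2 : Nat) : Int)).map
      (fun k => PySem.List.pyGetD val k "") ++ [PySem.List.pyGetD val (((bWindow br start stop).2 : Nat) : Int) ""] = _
  rw [bWindow_eq start stop br hps hpe]
  rw [PySem.List.slice_natCast,
    map_pyGetD_range ("" : String) val _ (le_of_lt hvl) _ _ rfl]

-- A's first output is a map over the break rows
theorem A_fst (start stop : Int) (break_list : List (List Int)) (value_list : List (List String)) :
    (subset_lanc_py start stop break_list value_list).1 =
      break_list.map (fun br =>
        (PySem.List.slice br (some ((PySem.List.bisectLeft br start : Nat) : Int))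
            (some ((PySem.List.bisectLeft br stop : Nat) : Int)) ++ [stop]).map (fun b => b - start)) := by
  induction break_list with
  | nil => simp [subset_lanc_py]
  | cons br brs ih => simpa [subset_lanc_py] using ih

-- A's second output is a map over the zipped rows
theorem A_snd (start stop : Int) : ∀ (break_list : List (List Int)) (value_list : List (List String)),
    (subset_lanc_py start stop break_list value_list).2 =
      (break_list.zip value_list).map (fun p =>
        PySem.List.slice p.2 (some ((PySem.List.bisectLeft p.1 start : Nat) : Int))
            (some ((PySem.List.bisectLeft p.1 stop : Nat) : Int)) ++
          [PySem.List.pyGetD p.2 ((PySem.List.bisectLeft p.1 stop : Nat) : Int) ""]) := by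
  intro break_list
  induction break_list with
  | nil => intro value_list; simp [subset_lanc_py]
  | cons br brs ih =>
    intro value_list
    cases value_list with
    | nil => simp [subset_lanc_py]
    | cons val vals => simpa [subset_lanc_py] using ih vals

-- ===== VERDICT (by name: the statement is the Claim_ definition above) =====
theorem subset_lanc_py_spec : Claim_equal_subset_lanc_py := by
  intro start stop break_list value_list _ hpre
  obtain ⟨hrows, hzip⟩ := hpre
  unfold Spec_subset_lanc_py subset_lanc_py_alt
  refine Prod.ext ?_ ?_
  · rw [A_fst]
    simp only
    exact (List.map_congr_left (fun br hbr =>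
      breakRow_eq start stop br (hrows br hbr).1 (hrows br hbr).2)).symm
  · rw [A_snd]
    simp only
    refine (List.map_congr_left (fun p hp => ?_)).symm
    have hbr : p.1 ∈ break_list := (List.of_mem_zip hp).1
    exact valueRow_eq start stop p.1 p.2 (hrows p.1 hbr).1 (hrows p.1 hbr).2 (hzip p hp)
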